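-- pv_equiv track=rewrite | github.com/jaguilardynasty/EC2-Instance | app.py | insert_markers_around_flagged_sentences
-- ===== SOURCE A (Python) =====
-- def insert_markers_around_flagged_sentences(input_text, flagged_sentences):
--     """
--     Inserts 'MARKER' before and after flagged sentences in the input text,
--     considering only alphabetical characters and ignoring punctuation and whitespace.
--     """
--     # Create normalized text and mapping from normalized index to original index
--     normalized_text, mapping = create_index_mapping(input_text)
--
--     # Collect all the insertions to make
--     insertions = []
--
--     # Process each flagged sentence
--     for sentence in flagged_sentences:
--         # Normalize the flagged sentence
--         normalized_sentence, _ = create_index_mapping(sentence)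
--
--         # Find all non-overlapping matches of the normalized sentence in the normalized text
--         start = 0
--         while True:
--             start = normalized_text.find(normalized_sentence, start)
--             if start == -1:
--                 break
--
--             # Calculate the start and end indices in the original text
--             original_start = mapping[start]
--             original_end = mapping[start + len(normalized_sentence) - 1] + 1
--
--             # Schedule the insertions
--             insertions.append((original_end, "</div>"))
--             insertions.append((original_start, "<div class='bolds'>"))
--
--             # Move start index beyond the current match to prevent overlapping
--             start += len(normalized_sentence)
--
--     # Apply the insertions in reverse order by sorting them by position descending
--     insertions.sort(reverse=True, key=lambda x: x[0])
--     output_text = list(input_text)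
--     for pos, text in insertions:
--         output_text.insert(pos, text)
--
--     return ''.join(output_text)
--
-- def create_index_mapping(text):
--     """
--     Create a normalized version of the text that contains only alphabetical characters,
--     and a mapping list where each index corresponds to the position of the character in the original text.
--     """
--     normalized_text = []
--     mapping = []
--     for index, char in enumerate(text):
--         if char.isalpha():
--             normalized_text.append(char.lower())
--             mapping.append(index)
--     return ''.join(normalized_text), mapping
-- ===== SOURCE B (Python) =====
-- def insert_markers_around_flagged_sentences(input_text, flagged_sentences):
--     """
--     Different strategy from the naive version: normalize once, build a first-letter
--     occurrence index (char -> candidate start positions) so each flagged sentence is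
--     only checked at positions where it can start, select non-overlapping matches with
--     a greedy fold over those candidates, and assemble the result in one forward pass
--     over the text using position buckets of markers (no sort, no repeated splicing).
--     """
--     pos = [i for i, c in enumerate(input_text) if c.isalpha()]
--     ntext = ''.join(input_text[i].lower() for i in pos)
--     occ = {}
--     for i, c in enumerate(ntext):
--         occ.setdefault(c, []).append(i)
--     buckets = {}
--     for sentence in flagged_sentences:
--         nsent = ''.join(c.lower() for c in sentence if c.isalpha())
--         if not nsent:
--             continue  # no alphabetic content: nothing to match
--         m = len(nsent)
--         nxt = 0
--         for i in occ.get(nsent[0], []):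
--             if i >= nxt and ntext[i:i + m] == nsent:
--                 buckets.setdefault(pos[i + m - 1] + 1, []).append("</div>")
--                 buckets.setdefault(pos[i], []).append("<div class='bolds'>")
--                 nxt = i + m
--     out = []
--     for j, ch in enumerate(input_text):
--         if j in buckets:
--             out.extend(reversed(buckets[j]))
--         out.append(ch)
--     if len(input_text) in buckets:
--         out.extend(reversed(buckets[len(input_text)]))
--     return ''.join(out)
-- ===== Notes on version B (the rewrite author's own statement) =====
-- stated objective: faster
-- what changed: B replaces A's per-sentence str.find scan over the whole normalized text by a first-letter occurrence index consulted per pattern with a greedy non-overlap fold, and replaces A's sort-descending plus repeated O(n) list.insert splicing by position buckets emptied in one forward pass over the text.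
import Mathlib
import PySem

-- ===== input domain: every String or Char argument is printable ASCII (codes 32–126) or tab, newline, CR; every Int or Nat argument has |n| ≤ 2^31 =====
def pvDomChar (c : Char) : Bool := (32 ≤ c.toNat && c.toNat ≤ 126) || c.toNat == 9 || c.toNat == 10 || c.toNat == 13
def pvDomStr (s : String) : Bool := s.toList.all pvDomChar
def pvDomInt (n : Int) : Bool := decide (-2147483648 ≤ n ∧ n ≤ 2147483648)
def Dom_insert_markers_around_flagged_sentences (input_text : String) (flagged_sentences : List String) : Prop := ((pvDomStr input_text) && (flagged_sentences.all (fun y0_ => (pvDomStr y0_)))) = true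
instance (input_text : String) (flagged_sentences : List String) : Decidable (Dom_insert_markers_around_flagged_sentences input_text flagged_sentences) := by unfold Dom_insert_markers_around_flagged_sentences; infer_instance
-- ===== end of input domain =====

-- B replaces A's whole-text str.find scans by a first-letter occurrence index with a greedy
-- candidate fold, and A's sort-plus-repeated-splicing by bucketed one-pass assembly (objective: faster).


-- ===== PORT A =====

-- create_index_mapping: normalized chars and index mapping, built by appending in one pass
def createIndexMapping (text : List Char) : List Char × List Int :=
  (PySem.List.enumerate text 0).foldl
    (fun (acc : List Char × List Int) p =>
      if PySem.Chars.isalpha p.2 then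
        (acc.1 ++ [PySem.Chars.lowerChar p.2], acc.2 ++ [p.1])
      else acc)
    ([], [])

-- A's inner `while True: start = normalized_text.find(...)` loop; fuel makes it total
-- (under Pre_ each found match advances start by ≥ 1, so fuel ntext.length + 1 is never exhausted)
def aFindLoop (ntext nsent : List Char) (mapping : List Int) :
    Nat → Int → List (Int × List Char) → List (Int × List Char)
  | 0, _, ins => ins
  | fuel+1, start, ins =>
    let f := PySem.Chars.findFrom ntext nsent start none
    if f = -1 then ins
    else
      let origStart := (PySem.List.pyGet? mapping f).getD 0          -- in range under Pre_
      let origEnd := (PySem.List.pyGet? mapping (f + nsent.length - 1)).getD 0 + 1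
      aFindLoop ntext nsent mapping fuel (f + (nsent.length : Int))
        (ins ++ [(origEnd, "</div>".toList), (origStart, "<div class='bolds'>".toList)])

def insert_markers_around_flagged_sentences (input_text : String) (flagged_sentences : List String) : String :=
  let nm := createIndexMapping input_text.toList
  let insertions := flagged_sentences.foldl
    (fun ins sentence => aFindLoop nm.1 (createIndexMapping sentence.toList).1 nm.2 (nm.1.length + 1) 0 ins)
    []
  let sortedIns := PySem.List.sorted insertions (fun x => x.1) true
  let out := sortedIns.foldl (fun (o : List (List Char)) pt => PySem.List.insert o pt.1 pt.2)
    (input_text.toList.map (fun c => [c]))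
  String.ofList out.flatten

-- ===== PORT B =====

-- pos = [i for i, c in enumerate(input_text) if c.isalpha()]
def bPos (chars : List Char) : List Int :=
  ((PySem.List.enumerate chars 0).filter (fun p => PySem.Chars.isalpha p.2)).map (fun p => p.1)

-- ntext = ''.join(input_text[i].lower() for i in pos); every i is an in-range index
def bNtext (chars : List Char) (pos : List Int) : List Char :=
  pos.map (fun i => PySem.Chars.lowerChar ((PySem.List.pyGet? chars i).getD ' '))

-- occ: first-letter index, char -> list of candidate start positions (setdefault+append)
def bOcc (ntext : List Char) : PySem.Dict Char (List Int) :=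
  (PySem.List.enumerate ntext 0).foldl
    (fun d p => d.insert p.2 (d.getD p.2 [] ++ [p.1])) PySem.Dict.empty

-- the greedy candidate loop of one sentence: state is (buckets, nxt)
def bCandLoop (ntext nsent : List Char) (pos : List Int) (cands : List Int)
    (st : PySem.Dict Int (List (List Char)) × Int) : PySem.Dict Int (List (List Char)) × Int :=
  cands.foldl
    (fun st i =>
      if i ≥ st.2 ∧ PySem.List.slice ntext (some i) (some (i + (nsent.length : Int))) = nsent then
        let k1 := (PySem.List.pyGet? pos (i + (nsent.length : Int) - 1)).getD 0 + 1
        let d1 := st.1.insert k1 (st.1.getD k1 [] ++ ["</div>".toList])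
        let k2 := (PySem.List.pyGet? pos i).getD 0
        let d2 := d1.insert k2 (d1.getD k2 [] ++ ["<div class='bolds'>".toList])
        (d2, i + (nsent.length : Int))
      else st)
    st

def insert_markers_around_flagged_sentences_alt (input_text : String) (flagged_sentences : List String) : String :=
  let chars := input_text.toList
  let pos := bPos chars
  let ntext := bNtext chars pos
  let occ := bOcc ntext
  let buckets := flagged_sentences.foldl
    (fun d sentence =>
      let nsent := (sentence.toList.filter (fun c => PySem.Chars.isalpha c)).map PySem.Chars.lowerChar
      match nsent with
      | [] => d                      -- no alphabetic content: nothing to match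
      | c0 :: _ => (bCandLoop ntext nsent pos (occ.getD c0 []) (d, 0)).1)
    PySem.Dict.empty
  let out := (PySem.List.enumerate chars 0).foldl
    (fun (o : List (List Char)) p =>
      (if buckets.contains p.1 then o ++ (buckets.getD p.1 []).reverse else o) ++ [[p.2]])
    []
  let out := if buckets.contains (chars.length : Int)
    then out ++ (buckets.getD (chars.length : Int) []).reverse else out
  String.ofList out.flatten

-- ===== PRECONDITION & SPEC =====
-- Pre_ excludes flagged sentences with no alphabetic character: there A's normalized
-- pattern is empty and A either raises IndexError (empty normalized text) or loops forever
-- (start never advances), so A returns no value on the excluded inputs.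
def Pre_insert_markers_around_flagged_sentences (input_text : String) (flagged_sentences : List String) : Prop :=
  ∀ s ∈ flagged_sentences, s.toList.any (fun c => PySem.Chars.isalpha c) = true
instance (input_text : String) (flagged_sentences : List String) : Decidable (Pre_insert_markers_around_flagged_sentences input_text flagged_sentences) := by unfold Pre_insert_markers_around_flagged_sentences; infer_instance

def pvWitness_insert_markers_around_flagged_sentences : String × List String := ("He said: Hi there!  hi THERE", ["hi, there", "said"])

def Spec_insert_markers_around_flagged_sentences (input_text : String) (flagged_sentences : List String) (out : String) : Prop := out = insert_markers_around_flagged_sentences_alt input_text flagged_sentences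
instance (input_text : String) (flagged_sentences : List String) (out : String) : Decidable (Spec_insert_markers_around_flagged_sentences input_text flagged_sentences out) := by unfold Spec_insert_markers_around_flagged_sentences; infer_instance

-- ===== CLAIM (what is proved, stated in full; the proofs are below) =====
def Claim_equal_insert_markers_around_flagged_sentences : Prop := ∀ (input_text : String) (flagged_sentences : List String), Dom_insert_markers_around_flagged_sentences input_text flagged_sentences → Pre_insert_markers_around_flagged_sentences input_text flagged_sentences → Spec_insert_markers_around_flagged_sentences input_text flagged_sentences (insert_markers_around_flagged_sentences input_text flagged_sentences)

-- ===== LEMMAS AND PROOFS =====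

-- ---------- normalization (shared ghost view): bNorm = list of (lowered char, original index) ----------

def bNorm (text : List Char) : List (Char × Int) :=
  ((PySem.List.enumerate text 0).filter (fun p => PySem.Chars.isalpha p.2)).map
    (fun p => (PySem.Chars.lowerChar p.2, p.1))

def bNormAux (text : List Char) (s : Int) : List (Char × Int) :=
  ((PySem.List.enumerate text s).filter (fun p => PySem.Chars.isalpha p.2)).map
    (fun p => (PySem.Chars.lowerChar p.2, p.1))

lemma cim_general (text : List Char) : ∀ (s : Int) (a : List Char) (b : List Int),
    (PySem.List.enumerate text s).foldl
      (fun (acc : List Char × List Int) p =>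
        if PySem.Chars.isalpha p.2 then
          (acc.1 ++ [PySem.Chars.lowerChar p.2], acc.2 ++ [p.1])
        else acc)
      (a, b)
    = (a ++ (bNormAux text s).map (·.1), b ++ (bNormAux text s).map (·.2)) := by
  induction text with
  | nil => intro s a b; simp [bNormAux, PySem.List.enumerate_nil]
  | cons c t ih =>
    intro s a b
    rw [PySem.List.enumerate_cons]
    by_cases h : PySem.Chars.isalpha c = true
    · simp only [List.foldl_cons, h, if_pos]
      rw [ih]
      simp [bNormAux, PySem.List.enumerate_cons, h]
    · simp only [List.foldl_cons]
      rw [if_neg (by simpa using h)]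
      rw [ih]
      simp [bNormAux, PySem.List.enumerate_cons, h]

lemma filter_map_enumerate (l : List Char) : ∀ (s : Int),
    (((PySem.List.enumerate l s).filter (fun p => PySem.Chars.isalpha p.2)).map
      (fun p => PySem.Chars.lowerChar p.2))
    = (l.filter (fun c => PySem.Chars.isalpha c)).map PySem.Chars.lowerChar := by
  induction l with
  | nil => intro s; simp [PySem.List.enumerate_nil]
  | cons c t ih =>
    intro s
    rw [PySem.List.enumerate_cons]
    by_cases h : PySem.Chars.isalpha c = true
    · simp [h, ih]
    · simp [h, ih]

lemma bNorm_eq_aux (text : List Char) : bNorm text = bNormAux text 0 := rfl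

lemma bNormAux_mem_bound (text : List Char) (pr : Char × Int) (h : pr ∈ bNormAux text 0) :
    0 ≤ pr.2 ∧ pr.2 < text.length := by
  simp only [bNormAux, List.mem_map, List.mem_filter] at h
  obtain ⟨q, ⟨hq, _⟩, rfl⟩ := h
  rw [PySem.List.mem_enumerate_iff] at hq
  obtain ⟨k, hk, rfl⟩ := hq
  refine ⟨by simp, by simp; omega⟩

lemma createIndexMapping_eq (text : List Char) :
    createIndexMapping text = ((bNorm text).map (·.1), (bNorm text).map (·.2)) := by
  unfold createIndexMapping
  rw [cim_general]
  simp [bNorm_eq_aux]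

lemma nsentB_eq (s : List Char) :
    (bNorm s).map (fun x => x.1)
      = (s.filter (fun c => PySem.Chars.isalpha c)).map PySem.Chars.lowerChar := by
  simp only [bNorm_eq_aux, bNormAux, List.map_map]
  rw [← filter_map_enumerate s 0]
  rfl

lemma bPos_eq (chars : List Char) : bPos chars = (bNorm chars).map (·.2) := by
  simp [bPos, bNorm, List.map_map]

lemma bNtext_eq (chars : List Char) : bNtext chars (bPos chars) = (bNorm chars).map (·.1) := by
  simp only [bNtext, bPos, bNorm, List.map_map]
  apply List.map_congr_left
  intro p hp
  rw [List.mem_filter, PySem.List.mem_enumerate_iff] at hp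
  obtain ⟨⟨k, hk, rfl⟩, _⟩ := hp
  simp only [Function.comp]
  rw [show ((0 : Int) + k) = ((k : Nat) : Int) by omega, PySem.List.pyGet?_natCast,
    List.getElem?_eq_getElem hk]
  rfl

lemma bNtext_eq' (chars : List Char) :
    bNtext chars ((bNorm chars).map (·.2)) = (bNorm chars).map (·.1) := by
  rw [← bPos_eq]
  exact bNtext_eq chars

-- ---------- the ghost naive scan (reference spec both ports are reduced to) ----------

def bScan (ntext nsent : List Char) (norm : List (Char × Int)) :
    Nat → Nat → List (Int × List Char) → List (Int × List Char)
  | 0, _, marks => marks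
  | fuel+1, i, marks =>
    if i + nsent.length ≤ ntext.length then
      if PySem.List.slice ntext (some (i : Int)) (some ((i : Int) + (nsent.length : Int))) = nsent then
        let e := (match PySem.List.pyGet? norm ((i : Int) + (nsent.length : Int) - 1) with
                  | some pr => pr.2 | none => 0) + 1
        let s := (match PySem.List.pyGet? norm ((i : Int)) with
                  | some pr => pr.2 | none => 0)
        bScan ntext nsent norm fuel (i + nsent.length)
          (marks ++ [(e, "</div>".toList), (s, "<div class='bolds'>".toList)])
      else bScan ntext nsent norm fuel (i + 1) marks
    else marks

lemma slice_take_drop (ntext nsent : List Char) (i : Nat) :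
    PySem.List.slice ntext (some (i : Int)) (some ((i : Int) + (nsent.length : Int)))
      = (ntext.drop i).take nsent.length := by
  rw [PySem.List.slice_natCast_add]

lemma bScan_none (ntext nsent : List Char) (norm : List (Char × Int)) :
    ∀ (fuel i : Nat) (marks : List (Int × List Char)),
    ¬ nsent <:+: ntext.drop i → bScan ntext nsent norm fuel i marks = marks := by
  intro fuel
  induction fuel with
  | zero => intros; rfl
  | succ fuel ih =>
    intro i marks hno
    simp only [bScan]
    split
    · rw [slice_take_drop]
      have hne : (ntext.drop i).take nsent.length ≠ nsent := by
        intro he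
        exact hno (List.IsPrefix.isInfix (by rw [← he]; exact List.take_prefix _ _))
      rw [if_neg hne]
      apply ih
      intro hinf
      exact hno (hinf.trans (by
        have : ntext.drop (i+1) = (ntext.drop i).drop 1 := by rw [List.drop_drop]
        rw [this]
        exact (List.drop_suffix _ _).isInfix))
    · rfl

lemma bScan_steps (ntext nsent : List Char) (norm : List (Char × Int)) :
    ∀ (j : Nat) (fb i : Nat) (marks : List (Int × List Char)),
    (∀ t, t < j → ¬ nsent <+: ntext.drop (i + t)) →
    i + j + nsent.length ≤ ntext.length →
    bScan ntext nsent norm (fb + j) i marks = bScan ntext nsent norm fb (i + j) marks := by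
  intro j
  induction j with
  | zero => intros; rfl
  | succ j ih =>
    intro fb i marks hno hlen
    have : fb + (j+1) = (fb + j) + 1 := by omega
    rw [this]
    simp only [bScan]
    rw [if_pos (by omega), slice_take_drop]
    rw [if_neg (by
      intro he
      exact hno 0 (by omega) (by rw [Nat.add_zero, ← he]; exact List.take_prefix _ _))]
    rw [ih fb (i+1) marks (by intro t ht; have := hno (t+1) (by omega); rwa [show i + (t+1) = i + 1 + t by omega] at this) (by omega)]
    congr 1
    omega

lemma bScan_acc (ntext nsent : List Char) (norm : List (Char × Int)) :
    ∀ (fuel i : Nat) (marks : List (Int × List Char)),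
    bScan ntext nsent norm fuel i marks = marks ++ bScan ntext nsent norm fuel i [] := by
  intro fuel
  induction fuel with
  | zero => intros; simp [bScan]
  | succ fuel ih =>
    intro i marks
    simp only [bScan]
    split
    · split
      · rw [ih _ (marks ++ _), ih _ ([] ++ _)]
        simp
      · exact ih _ marks
    · simp

lemma pyGet_map_snd (norm : List (Char × Int)) (idx : Nat) (h : idx < norm.length) :
    (PySem.List.pyGet? (norm.map (·.2)) ((idx : Nat) : Int)).getD 0
      = (match PySem.List.pyGet? norm ((idx : Nat) : Int) with
         | some pr => pr.2 | none => 0) := by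
  rw [PySem.List.pyGet?_natCast, PySem.List.pyGet?_natCast]
  simp [h]

-- A's find loop equals the ghost scan
lemma match_loop_eq (ntext nsent : List Char) (norm : List (Char × Int))
    (hm : nsent ≠ []) (hlen : ntext.length = norm.length) :
    ∀ (fa : Nat) (k fb : Nat) (acc : List (Int × List Char)),
    k ≤ ntext.length →
    ntext.length + 1 - k ≤ fa → ntext.length + 1 - k ≤ fb →
    aFindLoop ntext nsent (norm.map (·.2)) fa ((k : Nat) : Int) acc
      = bScan ntext nsent norm fb k acc := by
  intro fa
  induction fa using Nat.strong_induction_on with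
  | _ fa ihfa =>
  intro k fb acc hk hfa hfb
  obtain ⟨fa', rfl⟩ : ∃ fa', fa = fa' + 1 := ⟨fa - 1, by omega⟩
  simp only [aFindLoop]
  rw [PySem.Chars.findFrom_natCast ntext nsent k hk]
  by_cases hj : PySem.Chars.find (ntext.drop k) nsent = -1
  · rw [if_pos (by rw [hj]; simp)]
    rw [bScan_none _ _ _ _ _ _ (by rw [← PySem.Chars.find_eq_neg_one_iff]; exact hj)]
  · have hj0 : 0 ≤ PySem.Chars.find (ntext.drop k) nsent := by
      have := PySem.Chars.neg_one_le_find (ntext.drop k) nsent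
      omega
    set j := PySem.Chars.find (ntext.drop k) nsent with hjdef
    have hspec := PySem.Chars.find_spec (s := ntext.drop k) (sub := nsent) hj0
    obtain ⟨hpre, hmin⟩ := hspec
    have hjn : j = ((j.toNat : Nat) : Int) := by omega
    have hdd : ∀ t, List.drop t (List.drop k ntext) = ntext.drop (k + t) := by
      intro t; rw [List.drop_drop, Nat.add_comm]
    have hprefix : nsent <+: ntext.drop (k + j.toNat) := by
      rw [← hdd]; exact hpre
    have hlenle : k + j.toNat + nsent.length ≤ ntext.length := by
      have := hprefix.length_le
      simp only [List.length_drop] at this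
      have hkj : k + j.toNat ≤ ntext.length := by
        have hfl := PySem.Chars.find_le_length (ntext.drop k) nsent
        simp only [List.length_drop] at hfl
        omega
      omega
    have hm1 : 1 ≤ nsent.length := by
      cases nsent with
      | nil => exact absurd rfl hm
      | cons a b => simp
    rw [if_neg (by rw [if_neg hj]; omega)]
    rw [if_neg hj]
    have hfb' : fb = (fb - j.toNat) + j.toNat := by omega
    rw [hfb', bScan_steps _ _ _ _ _ _ _ (by
        intro t ht hpt
        exact hmin t (by omega) (by rw [hdd]; exact hpt))
      (by omega)]
    obtain ⟨fb', hfb'' ⟩ : ∃ fb', fb - j.toNat = fb' + 1 := ⟨fb - j.toNat - 1, by omega⟩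
    rw [hfb'']
    simp only [bScan]
    rw [if_pos (by omega), slice_take_drop]
    rw [if_pos (by
      rw [List.prefix_iff_eq_take] at hprefix
      exact hprefix.symm)]
    have eStart : (k : Int) + j = (((k + j.toNat : Nat) : Nat) : Int) := by omega
    have eEndB : ((k + j.toNat : Nat) : Int) + (nsent.length : Int) - 1
        = (((k + j.toNat + nsent.length - 1 : Nat) : Nat) : Int) := by omega
    rw [eStart, eEndB]
    rw [pyGet_map_snd norm (k + j.toNat) (by omega),
        pyGet_map_snd norm (k + j.toNat + nsent.length - 1) (by omega)]
    have eNext : (((k + j.toNat : Nat) : Nat) : Int) + (nsent.length : Int)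
        = (((k + j.toNat + nsent.length : Nat) : Nat) : Int) := by omega
    rw [eNext]
    exact ihfa fa' (by omega) (k + j.toNat + nsent.length) fb' _ (by omega) (by omega) (by omega)

-- A's fold over sentences, reduced to the ghost scan
lemma fold_marks_eq (ntext : List Char) (norm : List (Char × Int))
    (hlen : ntext.length = norm.length) :
    ∀ (l : List String) (acc : List (Int × List Char)),
    (∀ s ∈ l, s.toList.any (fun c => PySem.Chars.isalpha c) = true) →
    l.foldl (fun ins sentence =>
        aFindLoop ntext ((bNorm sentence.toList).map (fun x => x.1)) (norm.map (fun x => x.2))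
          (ntext.length + 1) 0 ins) acc
      = l.foldl (fun marks sentence =>
        bScan ntext ((sentence.toList.filter (fun c => PySem.Chars.isalpha c)).map PySem.Chars.lowerChar)
          norm (ntext.length + 1) 0 marks) acc := by
  intro l
  induction l with
  | nil => intros; rfl
  | cons s t ih =>
    intro acc hall
    simp only [List.foldl_cons]
    rw [nsentB_eq]
    have hne : (s.toList.filter (fun c => PySem.Chars.isalpha c)).map PySem.Chars.lowerChar ≠ [] := by
      have := hall s (List.mem_cons_self ..)
      rw [List.any_eq_true] at this
      obtain ⟨c, hc, hca⟩ := this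
      simp only [ne_eq, List.map_eq_nil_iff, List.filter_eq_nil_iff]
      intro h
      exact absurd hca (by simpa using h c hc)
    rw [show (0 : Int) = ((0 : Nat) : Int) from rfl]
    rw [match_loop_eq ntext _ norm hne hlen (ntext.length + 1) 0 (ntext.length + 1) acc
      (by omega) (by omega) (by omega)]
    exact ih _ (fun s hs => hall s (List.mem_cons_of_mem _ hs))

-- bounds of the positions the ghost scan emits
lemma bScan_bounds (ntext nsent : List Char) (norm : List (Char × Int)) (n : Nat)
    (hm : nsent ≠ []) (hlen : ntext.length = norm.length)
    (hN : ∀ pr ∈ norm, 0 ≤ pr.2 ∧ pr.2 + 1 ≤ (n : Int)) :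
    ∀ (fuel i : Nat) (marks : List (Int × List Char)),
    (∀ x ∈ marks, 0 ≤ x.1 ∧ x.1.toNat ≤ n) →
    ∀ x ∈ bScan ntext nsent norm fuel i marks, 0 ≤ x.1 ∧ x.1.toNat ≤ n := by
  intro fuel
  have hm1 : 1 ≤ nsent.length := List.length_pos_of_ne_nil hm
  induction fuel with
  | zero => intro i marks hmk; simpa [bScan] using hmk
  | succ fuel ih =>
    intro i marks hmk x hx
    simp only [bScan] at hx
    split at hx
    · split at hx
      · refine ih _ _ ?_ x hx
        intro y hy
        rcases List.mem_append.mp hy with h | h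
        · exact hmk y h
        · have hei : ((i : Int) + (nsent.length : Int) - 1)
              = (((i + nsent.length - 1 : Nat) : Nat) : Int) := by omega
          have h1 : i + nsent.length - 1 < norm.length := by omega
          have h2 : i < norm.length := by omega
          simp only [List.mem_cons, List.not_mem_nil, or_false] at h
          rcases h with rfl | rfl
          · rw [hei, PySem.List.pyGet?_natCast, List.getElem?_eq_getElem h1]
            have := hN _ (List.getElem_mem h1)
            simp only []
            exact ⟨by omega, by omega⟩
          · rw [PySem.List.pyGet?_natCast, List.getElem?_eq_getElem h2]
            have := hN _ (List.getElem_mem h2)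
            simp only []
            exact ⟨by omega, by omega⟩
      · exact ih _ _ hmk x hx
    · exact hmk x hx

lemma fold_marks_bounds (ntext : List Char) (norm : List (Char × Int)) (n : Nat)
    (hlen : ntext.length = norm.length)
    (hN : ∀ pr ∈ norm, 0 ≤ pr.2 ∧ pr.2 + 1 ≤ (n : Int)) :
    ∀ (l : List String) (acc : List (Int × List Char)),
    (∀ s ∈ l, s.toList.any (fun c => PySem.Chars.isalpha c) = true) →
    (∀ x ∈ acc, 0 ≤ x.1 ∧ x.1.toNat ≤ n) →
    ∀ x ∈ l.foldl (fun marks sentence =>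
        bScan ntext ((sentence.toList.filter (fun c => PySem.Chars.isalpha c)).map PySem.Chars.lowerChar)
          norm (ntext.length + 1) 0 marks) acc,
      0 ≤ x.1 ∧ x.1.toNat ≤ n := by
  intro l
  induction l with
  | nil => intro acc _ hacc x hx; exact hacc x hx
  | cons s t ih =>
    intro acc hall hacc x hx
    simp only [List.foldl_cons] at hx
    refine ih _ (fun s hs => hall s (List.mem_cons_of_mem _ hs)) ?_ x hx
    have hne : (s.toList.filter (fun c => PySem.Chars.isalpha c)).map PySem.Chars.lowerChar ≠ [] := by
      have := hall s (List.mem_cons_self ..)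
      rw [List.any_eq_true] at this
      obtain ⟨c, hc, hca⟩ := this
      simp only [ne_eq, List.map_eq_nil_iff, List.filter_eq_nil_iff]
      intro h
      exact absurd hca (by simpa using h c hc)
    exact bScan_bounds ntext _ norm n hne hlen hN _ _ _ hacc

-- ---------- A-side assembly: foldl insert over the sorted list = bAssemble ----------

lemma flatten_singletons (l : List Char) : (l.map (fun c => [c])).flatten = l := by
  induction l with
  | nil => rfl
  | cons c t ih => simp [ih]

lemma foldl_insert_split : ∀ (L : List (Int × List Char)) (X Y : List (List Char)),
    (∀ x ∈ L, 0 ≤ x.1 ∧ x.1.toNat ≤ X.length) →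
    L.foldl (fun o pt => PySem.List.insert o pt.1 pt.2) (X ++ Y)
      = L.foldl (fun o pt => PySem.List.insert o pt.1 pt.2) X ++ Y := by
  intro L
  induction L with
  | nil => intros; rfl
  | cons hd tl ih =>
    intro X Y hb
    obtain ⟨h0, hle⟩ := hb hd (List.mem_cons_self ..)
    have hq : hd.1 = ((hd.1.toNat : Nat) : Int) := by omega
    simp only [List.foldl_cons]
    rw [hq, PySem.List.insert_natCast _ _ _ (by simpa using Nat.le_trans hle (by simp)),
        PySem.List.insert_natCast _ _ _ hle]
    rw [List.take_append_of_le_length hle, List.drop_append_of_le_length hle]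
    rw [← List.cons_append, ← List.append_assoc]
    rw [ih _ _ ?_]
    intro x hx
    have := hb x (List.mem_cons_of_mem _ hx)
    refine ⟨this.1, ?_⟩
    simp only [List.length_append, List.length_take, List.length_cons, List.length_drop]
    omega

def bAssemble (chars : List Char) : List (Int × List Char) → Nat → List Char
  | [], k => chars.take k
  | (p, t) :: rest, k => bAssemble chars rest p.toNat ++ t ++ (chars.take k).drop p.toNat

lemma asm_A : ∀ (L : List (Int × List Char)) (k : Nat) (chars : List Char),
    k ≤ chars.length →
    (∀ x ∈ L, 0 ≤ x.1 ∧ x.1.toNat ≤ k) →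
    L.Pairwise (fun a b => b.1 ≤ a.1) →
    (L.foldl (fun o pt => PySem.List.insert o pt.1 pt.2)
      ((chars.take k).map (fun c => [c]))).flatten = bAssemble chars L k := by
  intro L
  induction L with
  | nil => intro k chars hk _ _; simp only [List.foldl_nil, flatten_singletons]; rfl
  | cons hd tl ih =>
    intro k chars hk hb hp
    obtain ⟨h0, hle⟩ := hb hd (List.mem_cons_self ..)
    have hlen : ((chars.take k).map (fun c => [c])).length = k := by
      simp only [List.length_map, List.length_take]; omega
    have hq : hd.1 = ((hd.1.toNat : Nat) : Int) := by omega
    have hrest : ∀ x ∈ tl, 0 ≤ x.1 ∧ x.1.toNat ≤ hd.1.toNat := by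
      intro x hx
      have h1 := hb x (List.mem_cons_of_mem _ hx)
      have h2 := (List.pairwise_cons.mp hp).1 x hx
      exact ⟨h1.1, by omega⟩
    simp only [List.foldl_cons]
    rw [hq, PySem.List.insert_natCast _ _ _ (by omega)]
    rw [show ((chars.take k).map (fun c => [c])).take hd.1.toNat ++
        hd.2 :: ((chars.take k).map (fun c => [c])).drop hd.1.toNat
        = (((chars.take k).map (fun c => [c])).take hd.1.toNat ++ [hd.2]) ++
          ((chars.take k).map (fun c => [c])).drop hd.1.toNat by simp]
    rw [foldl_insert_split _ _ _ (by
      intro x hx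
      refine ⟨(hrest x hx).1, ?_⟩
      simp only [List.length_append, List.length_take, List.length_cons, List.length_map,
        List.length_take]
      have := (hrest x hx).2
      omega)]
    rw [foldl_insert_split _ _ _ (by
      intro x hx
      refine ⟨(hrest x hx).1, ?_⟩
      simp only [List.length_take, List.length_map]
      have := (hrest x hx).2
      omega)]
    rw [show ((chars.take k).map (fun c => [c])).take hd.1.toNat
        = ((chars.take hd.1.toNat).map (fun c => [c])) by
      rw [← List.map_take, List.take_take, Nat.min_eq_left hle]]
    simp only [List.flatten_append]
    rw [ih hd.1.toNat chars (by omega) hrest (List.pairwise_cons.mp hp).2]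
    rw [← List.map_drop, flatten_singletons]
    simp [bAssemble]

-- ---------- B-side: the occurrence index ----------

lemma occ_foldl_getD (c : Char) :
    ∀ (l : List (Int × Char)) (d : PySem.Dict Char (List Int)),
    (l.foldl (fun d p => d.insert p.2 (d.getD p.2 [] ++ [p.1])) d).getD c []
      = d.getD c [] ++ (l.filter (fun p => p.2 == c)).map (·.1) := by
  intro l
  induction l with
  | nil => intro d; simp
  | cons p t ih =>
    intro d
    simp only [List.foldl_cons]
    rw [ih]
    by_cases h : p.2 = c
    · rw [PySem.Dict.getD_insert]
      simp [h]
    · rw [PySem.Dict.getD_insert]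
      simp [h, Ne.symm h]

lemma bOcc_getD (ntext : List Char) (c : Char) :
    (bOcc ntext).getD c []
      = ((PySem.List.enumerate ntext 0).filter (fun p => p.2 == c)).map (·.1) := by
  unfold bOcc
  rw [occ_foldl_getD]
  simp [PySem.Dict.getD_empty]

lemma cands_mem_iff (ntext : List Char) (c : Char) (i : Int) :
    i ∈ (bOcc ntext).getD c []
      ↔ ∃ k : Nat, ∃ h : k < ntext.length, i = (k : Int) ∧ ntext[k] = c := by
  rw [bOcc_getD]
  simp only [List.mem_map, List.mem_filter, PySem.List.mem_enumerate_iff]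
  constructor
  · rintro ⟨p, ⟨⟨k, hk, rfl⟩, hc⟩, rfl⟩
    exact ⟨k, hk, by omega, by simpa using hc⟩
  · rintro ⟨k, hk, rfl, hc⟩
    exact ⟨((0 : Int) + k, ntext[k]), ⟨⟨k, hk, rfl⟩, by simpa using hc⟩, by omega⟩

lemma cands_pairwise (ntext : List Char) (c : Char) :
    ((bOcc ntext).getD c []).Pairwise (· < ·) := by
  rw [bOcc_getD]
  apply List.Pairwise.map
  · intro a b h; exact h
  · exact (PySem.List.pairwise_lt_enumerate ntext 0).filter _

-- ---------- B-side: the greedy candidate loop, reduced to the ghost scan ----------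

def appendMark (d : PySem.Dict Int (List (List Char))) (pr : Int × List Char) :
    PySem.Dict Int (List (List Char)) :=
  d.insert pr.1 (d.getD pr.1 [] ++ [pr.2])

def gGreedy (ntext nsent : List Char) (pos : List Int) : List Int → Int → List (Int × List Char)
  | [], _ => []
  | i :: rest, nxt =>
    if i ≥ nxt ∧ PySem.List.slice ntext (some i) (some (i + (nsent.length : Int))) = nsent then
      ((PySem.List.pyGet? pos (i + (nsent.length : Int) - 1)).getD 0 + 1, "</div>".toList) ::
      ((PySem.List.pyGet? pos i).getD 0, "<div class='bolds'>".toList) ::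
      gGreedy ntext nsent pos rest (i + (nsent.length : Int))
    else gGreedy ntext nsent pos rest nxt

def gNxt (ntext nsent : List Char) : List Int → Int → Int
  | [], nxt => nxt
  | i :: rest, nxt =>
    if i ≥ nxt ∧ PySem.List.slice ntext (some i) (some (i + (nsent.length : Int))) = nsent then
      gNxt ntext nsent rest (i + (nsent.length : Int))
    else gNxt ntext nsent rest nxt

lemma candloop_eq (ntext nsent : List Char) (pos : List Int) :
    ∀ (cands : List Int) (d : PySem.Dict Int (List (List Char))) (nxt : Int),
    bCandLoop ntext nsent pos cands (d, nxt)
      = ((gGreedy ntext nsent pos cands nxt).foldl appendMark d, gNxt ntext nsent cands nxt) := by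
  intro cands
  induction cands with
  | nil => intros; rfl
  | cons i rest ih =>
    intro d nxt
    simp only [bCandLoop, List.foldl_cons, gGreedy, gNxt]
    split
    · rw [show (bCandLoop ntext nsent pos rest) = (fun st => bCandLoop ntext nsent pos rest st) from rfl] at *
      simp only [List.foldl_cons]
      exact ih _ _
    · exact ih _ _

-- a prefix occurrence forces the slice equality and vice versa
lemma prefix_iff_slice (ntext nsent : List Char) (k : Nat) (hm : nsent ≠ []) :
    (nsent <+: ntext.drop k ↔ (ntext.drop k).take nsent.length = nsent) := by
  constructor
  · intro h; rw [List.prefix_iff_eq_take] at h; exact h.symm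
  · intro h; rw [← h]; exact List.take_prefix _ _

lemma greedy_eq_scan (ntext nsent : List Char) (norm : List (Char × Int))
    (hm : nsent ≠ []) (hlen : ntext.length = norm.length) :
    ∀ (cands : List Int) (nxt fuel : Nat),
    cands.Pairwise (· < ·) →
    (∀ i ∈ cands, ∃ k : Nat, i = (k : Int)) →
    (∀ k : Nat, nxt ≤ k → nsent <+: ntext.drop k → (k : Int) ∈ cands) →
    ntext.length + 1 - nxt ≤ fuel →
    gGreedy ntext nsent (norm.map (·.2)) cands ((nxt : Nat) : Int)
      = bScan ntext nsent norm fuel nxt [] := by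
  intro cands
  have hm1 : 1 ≤ nsent.length := List.length_pos_of_ne_nil hm
  induction cands with
  | nil =>
    intro nxt fuel _ _ hcomp _
    rw [bScan_none]
    · rfl
    · intro hinf
      obtain ⟨t, hpre, hsuf⟩ := List.infix_iff_prefix_suffix.mp hinf
      have hj := List.suffix_iff_eq_drop.mp hsuf
      rw [hj, List.drop_drop] at hpre
      exact absurd (hcomp _ (by omega) hpre) (List.not_mem_nil)
  | cons i rest ih =>
    intro nxt fuel hpw hnn hcomp hfuel
    obtain ⟨k, rfl⟩ := hnn i (List.mem_cons_self ..)
    have hrest_nn : ∀ i ∈ rest, ∃ k : Nat, i = (k : Int) :=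
      fun i hi => hnn i (List.mem_cons_of_mem _ hi)
    have hrest_gt : ∀ x ∈ rest, (k : Int) < x := (List.pairwise_cons.mp hpw).1
    by_cases hklt : k < nxt
    · -- candidate before nxt: skipped on both sides (no value change)
      rw [gGreedy, if_neg (by push_neg; intro h; omega)]
      apply ih nxt fuel (List.pairwise_cons.mp hpw).2 hrest_nn _ hfuel
      intro t ht hpre
      have := hcomp t ht hpre
      rcases List.mem_cons.mp this with h | h
      · exfalso; omega
      · exact h
    · push_neg at hklt
      by_cases hmatch :
          PySem.List.slice ntext (some ((k : Nat) : Int)) (some (((k : Nat) : Int) + (nsent.length : Int))) = nsent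
      · -- a match at k, the first one at or after nxt
        have hsl : (ntext.drop k).take nsent.length = nsent := by
          rw [← slice_take_drop]; exact hmatch
        have hkm : k + nsent.length ≤ ntext.length := by
          have := congrArg List.length hsl
          simp only [List.length_take, List.length_drop] at this
          omega
        have hpre : nsent <+: ntext.drop k := (prefix_iff_slice ntext nsent k hm).mpr hsl
        have hnomid : ∀ t, t < k - nxt → ¬ nsent <+: ntext.drop (nxt + t) := by
          intro t ht hp
          have hmem := hcomp (nxt + t) (by omega) hp
          rcases List.mem_cons.mp hmem with h | h
          · omega
          · have := hrest_gt _ h; omega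
        rw [gGreedy, if_pos ⟨by omega, hmatch⟩]
        have hfb : fuel = (fuel - (k - nxt)) + (k - nxt) := by omega
        rw [hfb, bScan_steps ntext nsent norm (k - nxt) (fuel - (k - nxt)) nxt []
          (by intro t ht; exact hnomid t ht) (by omega)]
        rw [show nxt + (k - nxt) = k by omega]
        obtain ⟨fb', hfb'⟩ : ∃ fb', fuel - (k - nxt) = fb' + 1 := ⟨fuel - (k - nxt) - 1, by omega⟩
        rw [hfb']
        simp only [bScan]
        rw [if_pos (by omega), slice_take_drop, if_pos hsl]
        rw [bScan_acc]
        have eEnd : ((k : Nat) : Int) + (nsent.length : Int) - 1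
            = (((k + nsent.length - 1 : Nat) : Nat) : Int) := by omega
        rw [eEnd, pyGet_map_snd norm (k + nsent.length - 1) (by omega),
            pyGet_map_snd norm k (by omega)]
        have eNxt : ((k : Nat) : Int) + (nsent.length : Int)
            = (((k + nsent.length : Nat) : Nat) : Int) := by omega
        rw [eNxt]
        rw [ih (k + nsent.length) fb' (List.pairwise_cons.mp hpw).2 hrest_nn ?_ (by omega)]
        · simp
        · intro t ht hp
          have hmem := hcomp t (by omega) hp
          rcases List.mem_cons.mp hmem with h | h
          · exfalso; omega
          · exact h
      · -- no match at k: skipped; k cannot carry a match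
        rw [gGreedy, if_neg (by rintro ⟨_, h⟩; exact hmatch h)]
        apply ih nxt fuel (List.pairwise_cons.mp hpw).2 hrest_nn _ hfuel
        intro t ht hp
        have hmem := hcomp t ht hp
        rcases List.mem_cons.mp hmem with h | h
        · exfalso
          have : t = k := by omega
          subst this
          exact hmatch (by rw [slice_take_drop]; exact ((prefix_iff_slice ntext nsent t hm).mp hp))
        · exact h

-- ---------- B-side: buckets are the appendMark fold of the ghost marks ----------

lemma buckets_eq (chars : List Char) :
    ∀ (l : List String) (d : PySem.Dict Int (List (List Char))) (m : List (Int × List Char)),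
    (∀ s ∈ l, s.toList.any (fun c => PySem.Chars.isalpha c) = true) →
    d = m.foldl appendMark PySem.Dict.empty →
    l.foldl
      (fun d sentence =>
        let nsent := (sentence.toList.filter (fun c => PySem.Chars.isalpha c)).map PySem.Chars.lowerChar
        match nsent with
        | [] => d
        | c0 :: _ =>
          (bCandLoop ((bNorm chars).map (fun p => p.1)) nsent ((bNorm chars).map (·.2))
            ((bOcc ((bNorm chars).map (fun p => p.1))).getD c0 []) (d, 0)).1) d
    = (l.foldl (fun marks sentence =>
        bScan ((bNorm chars).map (fun p => p.1))
          ((sentence.toList.filter (fun c => PySem.Chars.isalpha c)).map PySem.Chars.lowerChar)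
          (bNorm chars) (((bNorm chars).map (fun p => p.1)).length + 1) 0 marks) m).foldl
        appendMark PySem.Dict.empty := by
  intro l
  induction l with
  | nil => intro d m _ hd; simpa using hd
  | cons s t ih =>
    intro d m hall hd
    set ntext := (bNorm chars).map (fun p => p.1) with hntext
    set nsent := (s.toList.filter (fun c => PySem.Chars.isalpha c)).map PySem.Chars.lowerChar with hnsent
    have hne : nsent ≠ [] := by
      have := hall s (List.mem_cons_self ..)
      rw [List.any_eq_true] at this
      obtain ⟨c, hc, hca⟩ := this
      simp only [hnsent, ne_eq, List.map_eq_nil_iff, List.filter_eq_nil_iff]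
      intro h
      exact absurd hca (by simpa using h c hc)
    obtain ⟨c0, ns', hcons⟩ : ∃ c0 ns', nsent = c0 :: ns' := by
      cases h : nsent with
      | nil => exact absurd h hne
      | cons a b => exact ⟨a, b, rfl⟩
    have hlen : ntext.length = (bNorm chars).length := by simp [hntext]
    simp only [List.foldl_cons]
    refine ih _ _ (fun s hs => hall s (List.mem_cons_of_mem _ hs)) ?_
    -- the per-sentence step preserves the invariant
    rw [← hnsent, hcons]
    show (bCandLoop ntext (c0 :: ns') ((bNorm chars).map (·.2))
      ((bOcc ntext).getD c0 []) (d, 0)).1 = _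
    rw [candloop_eq]
    simp only []
    rw [show (0 : Int) = ((0 : Nat) : Int) from rfl]
    rw [greedy_eq_scan ntext (c0 :: ns') (bNorm chars) (by simp) hlen
      ((bOcc ntext).getD c0 []) 0 (ntext.length + 1)
      (cands_pairwise ntext c0)
      (by
        intro i hi
        obtain ⟨k, _, rfl, _⟩ := (cands_mem_iff ntext c0 i).mp hi
        exact ⟨k, rfl⟩)
      (by
        intro k _ hpre
        have hk : k < ntext.length := by
          have := hpre.length_le
          simp only [List.length_drop] at this
          simp at this ⊢
          omega
        refine (cands_mem_iff ntext c0 ((k : Nat) : Int)).mpr ⟨k, hk, rfl, ?_⟩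
        obtain ⟨r, hr⟩ := hpre
        have hdk : ntext.drop k = c0 :: (ns' ++ r) := by rw [← hr]; rfl
        have h1 := List.drop_eq_getElem_cons hk
        rw [hdk] at h1
        injection h1 with h1a _
        exact h1a.symm)
      (by omega)]
    have hR : List.foldl appendMark PySem.Dict.empty
        (bScan ntext (c0 :: ns') (bNorm chars) (ntext.length + 1) 0 m)
        = List.foldl appendMark d (bScan ntext (c0 :: ns') (bNorm chars) (ntext.length + 1) 0 []) := by
      rw [bScan_acc ntext (c0 :: ns') (bNorm chars) (ntext.length + 1) 0 m,
        List.foldl_append, ← hd]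
    rw [hR]

-- ---------- B-side: bucket lookups after the fold ----------

lemma bucket_foldl_getD (j : Int) :
    ∀ (l : List (Int × List Char)) (d : PySem.Dict Int (List (List Char))),
    (l.foldl appendMark d).getD j []
      = d.getD j [] ++ (l.filter (fun x => x.1 == j)).map (·.2) := by
  intro l
  induction l with
  | nil => intro d; simp
  | cons p t ih =>
    intro d
    simp only [List.foldl_cons, appendMark]
    rw [ih]
    by_cases h : p.1 = j
    · rw [PySem.Dict.getD_insert]
      simp [h]
    · rw [PySem.Dict.getD_insert]
      simp [h, Ne.symm h]

lemma bucket_foldl_contains (j : Int) :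
    ∀ (l : List (Int × List Char)) (d : PySem.Dict Int (List (List Char))),
    (l.foldl appendMark d).contains j = (d.contains j || l.any (fun x => x.1 == j)) := by
  intro l
  induction l with
  | nil => intro d; simp
  | cons p t ih =>
    intro d
    simp only [List.foldl_cons, appendMark, List.any_cons]
    rw [ih, PySem.Dict.contains_insert]
    by_cases h : j = p.1
    · subst h; simp
    · have h1 : (j == p.1) = false := beq_eq_false_iff_ne.mpr h
      have h2 : (p.1 == j) = false := beq_eq_false_iff_ne.mpr (Ne.symm h)
      simp [h1, h2]

-- group of marker strings scheduled at one position, in final textual order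
def grpF (M : List (Int × List Char)) (j : Int) : List Char :=
  (((M.filter (fun x => x.1 == j)).map (·.2)).reverse).flatten

-- the canonical assembled output: markers at j, then character j, for every index
def canonF (chars : List Char) (M : List (Int × List Char)) (k : Nat) : List Char :=
  ((List.range k).map (fun j => grpF M ((j : Nat) : Int) ++ [chars.getD j ' '])).flatten
    ++ grpF M ((k : Nat) : Int)

-- ---------- bAssemble over a descending list = canonF ----------

lemma take_eq_canon (chars : List Char) : ∀ (k : Nat), k ≤ chars.length →
    ((List.range k).map (fun j => [chars.getD j ' '])).flatten = chars.take k := by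
  intro k
  induction k with
  | zero => intro _; simp
  | succ k ih =>
    intro hk
    rw [List.range_succ]
    simp only [List.map_append, List.flatten_append, ih (by omega)]
    have hk' : k < chars.length := by omega
    rw [List.take_succ]
    simp [List.getElem?_eq_getElem hk', List.getD_eq_getElem chars ' ' hk']

lemma drop_take_eq (chars : List Char) (q k : Nat) (hq : q ≤ k) (hk : k ≤ chars.length) :
    (chars.take k).drop q = ((List.range (k - q)).map (fun i => chars.getD (q + i) ' ')) := by
  apply List.ext_getElem
  · simp; omega
  · intro j h1 h2
    simp only [List.getElem_drop, List.getElem_take, List.getElem_map, List.getElem_range]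
    rw [List.getD_eq_getElem chars ' ' (by simp at h1; omega)]

-- ---------- stability of the descending sort w.r.t. per-position groups ----------

lemma insertBy_pairwise_desc (x : Int × List Char) :
    ∀ (ys : List (Int × List Char)),
    ys.Pairwise (fun a b => b.1 ≤ a.1) →
    (PySem.List.insertBy (fun a b => decide (b.1 < a.1)) x ys).Pairwise (fun a b => b.1 ≤ a.1) := by
  intro ys
  induction ys with
  | nil => intro _; simp [PySem.List.insertBy]
  | cons y t ih =>
    intro hp
    rw [PySem.List.insertBy]
    split
    · rename_i hlt
      simp only [decide_eq_true_eq] at hlt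
      refine List.pairwise_cons.mpr ⟨?_, hp⟩
      intro z hz
      rcases List.mem_cons.mp hz with rfl | h
      · omega
      · have := (List.pairwise_cons.mp hp).1 z h
        omega
    · rename_i hge
      simp only [decide_eq_true_eq] at hge
      push_neg at hge
      refine List.pairwise_cons.mpr ⟨?_, ih (List.pairwise_cons.mp hp).2⟩
      intro z hz
      rcases (PySem.List.mem_insertBy _ _ _ _).mp hz with rfl | h
      · exact hge
      · exact (List.pairwise_cons.mp hp).1 z h

lemma filter_insertBy_desc (x : Int × List Char) (j : Int) :
    ∀ (ys : List (Int × List Char)),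
    ys.Pairwise (fun a b => b.1 ≤ a.1) →
    (PySem.List.insertBy (fun a b => decide (b.1 < a.1)) x ys).filter (fun y => y.1 == j)
      = ys.filter (fun y => y.1 == j) ++ (if x.1 == j then [x] else []) := by
  intro ys
  induction ys with
  | nil =>
    intro _
    simp only [PySem.List.insertBy, List.filter_nil, List.nil_append]
    by_cases h : x.1 = j <;> simp [h]
  | cons y t ih =>
    intro hp
    rw [PySem.List.insertBy]
    split
    · rename_i hlt
      simp only [decide_eq_true_eq] at hlt
      have hempty : (y :: t).filter (fun z => z.1 == j) = [] ∨ ¬ (x.1 = j) := by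
        by_cases hx : x.1 = j
        · left
          rw [List.filter_eq_nil_iff]
          intro z hz
          rcases List.mem_cons.mp hz with rfl | h
          · simp; omega
          · have := (List.pairwise_cons.mp hp).1 z h
            simp; omega
        · right; exact hx
      by_cases hx : x.1 = j
      · rcases hempty with he | he
        · rw [List.filter_cons, if_pos (by simpa using hx), he]
          simp [hx]
        · exact absurd hx he
      · rw [List.filter_cons, if_neg (by simpa using hx)]
        simp [hx]
    · rename_i hge
      rw [List.filter_cons, List.filter_cons]
      rw [ih (List.pairwise_cons.mp hp).2]
      by_cases hy : y.1 = j <;> simp [hy]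

lemma sorted_filter_eq (M : List (Int × List Char)) (j : Int) :
    (PySem.List.sorted M (fun x => x.1) true).filter (fun y => y.1 == j)
      = M.filter (fun y => y.1 == j) := by
  rw [PySem.List.sorted_rev_eq_foldl_insertBy]
  suffices h : ∀ (l : List (Int × List Char)) (acc : List (Int × List Char)),
      acc.Pairwise (fun a b => b.1 ≤ a.1) →
      (l.foldl (fun acc x => PySem.List.insertBy (fun a b => decide (b.1 < a.1)) x acc) acc).filter
          (fun y => y.1 == j)
        = acc.filter (fun y => y.1 == j) ++ l.filter (fun y => y.1 == j) by
    simpa using h M [] (by simp)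
  intro l
  induction l with
  | nil => intro acc _; simp
  | cons x t ih =>
    intro acc hp
    simp only [List.foldl_cons]
    rw [ih _ (insertBy_pairwise_desc x acc hp)]
    rw [filter_insertBy_desc x j acc hp]
    rw [List.filter_cons]
    by_cases hx : x.1 = j <;> simp [hx]

lemma grpF_sorted (M : List (Int × List Char)) (j : Int) :
    grpF (PySem.List.sorted M (fun x => x.1) true) j = grpF M j := by
  simp only [grpF, sorted_filter_eq]

lemma canonF_sorted (chars : List Char) (M : List (Int × List Char)) (k : Nat) :
    canonF chars (PySem.List.sorted M (fun x => x.1) true) k = canonF chars M k := by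
  simp only [canonF, grpF_sorted]

-- ---------- bAssemble over a descending list = canonF ----------

lemma flatten_map_singleton {A : Type} (f : A -> Char) :
    ∀ (l : List A), (l.map (fun x => [f x])).flatten = l.map f := by
  intro l
  induction l with
  | nil => rfl
  | cons x t ih => simp [ih]

lemma asm_C : ∀ (S : List (Int × List Char)) (k : Nat) (chars : List Char),
    k ≤ chars.length →
    (∀ x ∈ S, 0 ≤ x.1 ∧ x.1.toNat ≤ k) →
    S.Pairwise (fun a b => b.1 ≤ a.1) →
    bAssemble chars S k = canonF chars S k := by
  intro S
  induction S with
  | nil =>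
    intro k chars hk _ _
    simp only [bAssemble, canonF, grpF, List.filter_nil, List.map_nil, List.reverse_nil,
      List.flatten_nil, List.append_nil]
    rw [← take_eq_canon chars k hk]
    simp
  | cons hd tl ih =>
    intro k chars hk hb hp
    obtain ⟨h0, hle⟩ := hb hd (List.mem_cons_self ..)
    set q := hd.1.toNat with hqdef
    have hq : hd.1 = ((q : Nat) : Int) := by omega
    have htl_le : ∀ x ∈ tl, x.1 ≤ hd.1 := (List.pairwise_cons.mp hp).1
    have htl_b : ∀ x ∈ tl, 0 ≤ x.1 ∧ x.1.toNat ≤ q := by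
      intro x hx
      have h1 := hb x (List.mem_cons_of_mem _ hx)
      have h2 := htl_le x hx
      exact ⟨h1.1, by omega⟩
    have hIH : bAssemble chars tl q = canonF chars tl q :=
      ih q chars (by omega) htl_b (List.pairwise_cons.mp hp).2
    have hgrp_lt : ∀ j : Nat, j < q → grpF (hd :: tl) ((j : Nat) : Int) = grpF tl ((j : Nat) : Int) := by
      intro j hj
      simp only [grpF, List.filter_cons]
      rw [if_neg (by simp [hq]; omega)]
    have hgrp_eq : grpF (hd :: tl) ((q : Nat) : Int) = grpF tl ((q : Nat) : Int) ++ hd.2 := by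
      simp only [grpF, List.filter_cons]
      rw [if_pos (by simp [hq])]
      simp
    have hgrp_gt : ∀ j : Nat, q < j → grpF (hd :: tl) ((j : Nat) : Int) = [] := by
      intro j hj
      have hfilt : (hd :: tl).filter (fun x => x.1 == ((j : Nat) : Int)) = [] := by
        rw [List.filter_eq_nil_iff]
        intro x hx
        rcases List.mem_cons.mp hx with rfl | h
        · simp [hq]; omega
        · have := htl_le x h; simp; omega
      simp [grpF, hfilt]
    have hbass : bAssemble chars (hd :: tl) k
        = bAssemble chars tl q ++ hd.2 ++ (chars.take k).drop q := by
      obtain ⟨p, t⟩ := hd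
      rfl
    rw [hbass, hIH]
    have hmap_lt : (List.range q).map (fun j => grpF (hd :: tl) ((j : Nat) : Int) ++ [chars.getD j ' '])
        = (List.range q).map (fun j => grpF tl ((j : Nat) : Int) ++ [chars.getD j ' ']) :=
      List.map_congr_left (fun j hj => by rw [hgrp_lt j (List.mem_range.mp hj)])
    by_cases hqk : q = k
    · subst hqk
      rw [show canonF chars (hd :: tl) q
          = ((List.range q).map (fun j => grpF (hd :: tl) ((j : Nat) : Int) ++ [chars.getD j ' '])).flatten
            ++ grpF (hd :: tl) ((q : Nat) : Int) from rfl]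
      rw [hmap_lt, hgrp_eq, List.drop_eq_nil_of_le (by simp)]
      rw [canonF]
      simp [List.append_assoc]
    · have hqk' : q < k := by omega
      have hsplit : List.range k = List.range q ++ (List.range (k - q)).map (fun x => q + x) := by
        rw [show k = q + (k - q) by omega, List.range_add]
        simp
      have hdrop : (chars.take k).drop q = chars.getD q ' ' :: (chars.take k).drop (q + 1) := by
        have hql : q < (chars.take k).length := by simp; omega
        rw [List.drop_eq_getElem_cons hql]
        congr 1
        rw [List.getElem_take, List.getD_eq_getElem chars ' ' (by omega)]
      have hmidlist :
          ((List.range (k - q)).map (fun x => grpF (hd :: tl) (((q + x : Nat)) : Int)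
            ++ [chars.getD (q + x) ' '])).flatten
          = grpF tl ((q : Nat) : Int) ++ hd.2 ++ (chars.take k).drop q := by
        rw [show k - q = (k - q - 1) + 1 by omega, List.range_succ_eq_map]
        simp only [List.map_cons, List.flatten_cons, List.map_map]
        rw [show q + 0 = q from rfl, hgrp_eq]
        have hfun : ((fun x => grpF (hd :: tl) (((q + x : Nat)) : Int) ++ [chars.getD (q + x) ' ']) ∘ Nat.succ)
            = (fun x => [chars.getD (q + 1 + x) ' ']) := by
          funext x
          simp only [Function.comp, Nat.succ_eq_add_one]
          rw [hgrp_gt (q + (x + 1)) (by omega)]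
          rw [show q + (x + 1) = q + 1 + x by omega]
          simp
        rw [hfun, flatten_map_singleton (fun x => chars.getD (q + 1 + x) ' ')]
        rw [show (List.range (k - q - 1)).map (fun x => chars.getD (q + 1 + x) ' ')
            = (chars.take k).drop (q + 1) by
          rw [drop_take_eq chars (q + 1) k (by omega) hk]
          rw [show k - (q + 1) = k - q - 1 by omega]]
        rw [hdrop]
        simp [List.append_assoc]
      have hrhs : canonF chars (hd :: tl) k
          = ((List.range k).map (fun j => grpF (hd :: tl) ((j : Nat) : Int)
              ++ [chars.getD j ' '])).flatten ++ grpF (hd :: tl) ((k : Nat) : Int) := rfl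
      rw [hrhs, hsplit, List.map_append, List.flatten_append, hmap_lt, hgrp_gt k hqk']
      rw [List.map_map]
      rw [show ((fun j => grpF (hd :: tl) ((j : Nat) : Int) ++ [chars.getD j ' ']) ∘ (fun x => q + x))
          = (fun x => grpF (hd :: tl) (((q + x : Nat)) : Int) ++ [chars.getD (q + x) ' ']) from rfl]
      rw [hmidlist]
      rw [show canonF chars tl q
          = ((List.range q).map (fun j => grpF tl ((j : Nat) : Int)
              ++ [chars.getD j ' '])).flatten ++ grpF tl ((q : Nat) : Int) from rfl]
      simp [List.getD, List.append_assoc]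

-- ---------- B's one-pass assembly = canonF ----------

lemma foldl_append_f {α : Type} (f : α → List (List Char)) :
    ∀ (l : List α) (init : List (List Char)),
    l.foldl (fun o p => o ++ f p) init = init ++ l.flatMap f := by
  intro l
  induction l with
  | nil => intro init; simp
  | cons x t ih => intro init; simp [ih, List.append_assoc]

lemma enumerate_eq_range (xs : List Char) : ∀ (s : Int),
    PySem.List.enumerate xs s
      = (List.range xs.length).map (fun (j : Nat) => (s + (j : Int), xs.getD j ' ')) := by
  induction xs with
  | nil => intro s; simp [PySem.List.enumerate_nil]
  | cons c t ih =>
    intro s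
    rw [PySem.List.enumerate_cons, ih]
    simp only [List.length_cons, List.range_succ_eq_map, List.map_cons, List.map_map]
    congr 1
    · simp
    · apply List.map_congr_left
      intro j hj
      simp only [Function.comp, Nat.succ_eq_add_one, List.getD_cons_succ]
      congr 1
      push_cast
      ring

lemma flatten_flatMap {α : Type} (g : α → List (List Char)) :
    ∀ (l : List α), (l.flatMap g).flatten = l.flatMap (fun a => (g a).flatten) := by
  intro l
  induction l with
  | nil => rfl
  | cons x t ih => simp [ih]

lemma b_assembly (chars : List Char) (M : List (Int × List Char))
    (buckets : PySem.Dict Int (List (List Char)))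
    (hB : buckets = M.foldl appendMark PySem.Dict.empty) :
    (if buckets.contains (chars.length : Int)
      then ((PySem.List.enumerate chars 0).foldl
          (fun (o : List (List Char)) p =>
            (if buckets.contains p.1 then o ++ (buckets.getD p.1 []).reverse else o) ++ [[p.2]]) [])
        ++ (buckets.getD (chars.length : Int) []).reverse
      else ((PySem.List.enumerate chars 0).foldl
          (fun (o : List (List Char)) p =>
            (if buckets.contains p.1 then o ++ (buckets.getD p.1 []).reverse else o) ++ [[p.2]]) [])).flatten
    = canonF chars M chars.length := by
  subst hB
  have hgrp : ∀ j : Int, (M.foldl appendMark PySem.Dict.empty).getD j []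
      = (M.filter (fun x => x.1 == j)).map (·.2) := by
    intro j
    rw [bucket_foldl_getD]
    simp [PySem.Dict.getD_empty]
  have hstep : ∀ (o : List (List Char)) (j : Int),
      (if (M.foldl appendMark PySem.Dict.empty).contains j
        then o ++ ((M.foldl appendMark PySem.Dict.empty).getD j []).reverse else o)
        = o ++ ((M.filter (fun x => x.1 == j)).map (·.2)).reverse := by
    intro o j
    by_cases hc : (M.foldl appendMark PySem.Dict.empty).contains j = true
    · rw [if_pos hc, hgrp]
    · rw [if_neg hc]
      have hfalse : (M.foldl appendMark PySem.Dict.empty).contains j = false := by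
        revert hc; cases (M.foldl appendMark PySem.Dict.empty).contains j <;> simp
      rw [bucket_foldl_contains j M PySem.Dict.empty, PySem.Dict.contains_empty,
        Bool.false_or] at hfalse
      have hnil : M.filter (fun x => x.1 == j) = [] := by
        rw [List.filter_eq_nil_iff]
        intro x hx
        exact List.any_eq_false.mp hfalse x hx
      simp [hnil]
  have hfn : (fun (o : List (List Char)) (p : Int × Char) =>
        (if (M.foldl appendMark PySem.Dict.empty).contains p.1
          then o ++ ((M.foldl appendMark PySem.Dict.empty).getD p.1 []).reverse else o) ++ [[p.2]])
      = (fun o p => o ++ (((M.filter (fun x => x.1 == p.1)).map (·.2)).reverse ++ [[p.2]])) := by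
    funext o p
    rw [hstep]
    simp
  rw [hfn, foldl_append_f, hstep]
  simp only [List.nil_append, List.flatten_append]
  rw [enumerate_eq_range chars 0, List.flatMap_map, flatten_flatMap]
  have hfun2 : (fun (a : Nat) =>
        ((((M.filter (fun x => x.1 == ((0 : Int) + (a : Int)))).map (·.2)).reverse
          ++ [[chars.getD a ' ']]).flatten))
      = (fun (a : Nat) => grpF M ((a : Nat) : Int) ++ [chars.getD a ' ']) := by
    funext a
    simp [grpF]
  rw [hfun2]
  rw [canonF, List.flatMap_def]
  congr 1

-- ===== VERDICT (by name: the statement is the Claim_ definition above) =====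
set_option maxHeartbeats 1600000 in
theorem insert_markers_around_flagged_sentences_spec : Claim_equal_insert_markers_around_flagged_sentences := by
  intro input_text flagged_sentences hdom hpre
  unfold Spec_insert_markers_around_flagged_sentences
  unfold insert_markers_around_flagged_sentences insert_markers_around_flagged_sentences_alt
  simp only [createIndexMapping_eq, bPos_eq, bNtext_eq']
  set chars := input_text.toList with hchars
  set norm := bNorm chars with hnorm
  set ntext := norm.map (fun p => p.1) with hntext
  have hlen : ntext.length = norm.length := by simp [hntext]
  rw [fold_marks_eq ntext norm hlen flagged_sentences [] hpre]
  set marks := flagged_sentences.foldl (fun marks sentence =>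
      bScan ntext ((sentence.toList.filter (fun c => PySem.Chars.isalpha c)).map PySem.Chars.lowerChar)
        norm (ntext.length + 1) 0 marks) [] with hmarks
  set S := PySem.List.sorted marks (fun x => x.1) true with hS
  have hNn : ∀ pr ∈ norm, 0 ≤ pr.2 ∧ pr.2 + 1 ≤ (chars.length : Int) := by
    intro pr hpr
    have := bNormAux_mem_bound chars pr (by rwa [← bNorm_eq_aux])
    omega
  have hbound : ∀ x ∈ S, 0 ≤ x.1 ∧ x.1.toNat ≤ chars.length := by
    intro x hx
    rw [hS, PySem.List.mem_sorted] at hx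
    exact fold_marks_bounds ntext norm chars.length hlen hNn flagged_sentences [] hpre
      (by simp) x hx
  have hpair : S.Pairwise (fun a b => b.1 ≤ a.1) := by
    have := PySem.List.sorted_pairwise_rev (xs := marks) (key := fun x => x.1)
    simpa using this
  -- A's side: sorted-insert splicing = bAssemble = canonF of the marks
  have hA : (S.foldl (fun (o : List (List Char)) pt => PySem.List.insert o pt.1 pt.2)
      (chars.map (fun c => [c]))).flatten = canonF chars marks chars.length := by
    have h1 := asm_A S chars.length chars (le_refl _) hbound hpair
    rw [List.take_length] at h1
    rw [h1, asm_C S chars.length chars (le_refl _) hbound hpair]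
    have : canonF chars S chars.length = canonF chars marks chars.length := by
      rw [hS]
      exact canonF_sorted chars marks chars.length
    exact this
  -- B's side: buckets + one forward pass = canonF of the marks
  have hBk : (flagged_sentences.foldl
      (fun d sentence =>
        let nsent := (sentence.toList.filter (fun c => PySem.Chars.isalpha c)).map PySem.Chars.lowerChar
        match nsent with
        | [] => d
        | c0 :: _ =>
          (bCandLoop ntext nsent (norm.map (·.2)) ((bOcc ntext).getD c0 []) (d, 0)).1)
      PySem.Dict.empty) = marks.foldl appendMark PySem.Dict.empty := by
    rw [hmarks, hntext, hnorm]
    exact buckets_eq chars flagged_sentences PySem.Dict.empty [] hpre rfl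
  rw [hA]
  exact congrArg String.ofList ((b_assembly chars marks _ hBk).symm)
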